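-- pv_equiv track=rewrite | github.com/davidheintz/MarketAnalysis | main.py | gen_diversification
-- ===== SOURCE A (Python) =====
-- def gen_diversification(x, y):
--
--     # 4 arrays hold values tied to occurrences of: both stocks up, both down, and one up one down
--     dbl_up = [0, 0, 0]
--     dwn_up = [0, 0, 0]
--     up_dwn = [0, 0, 0]
--     dbl_dwn = [0, 0, 0]
--
--     # loop through all dates in compared stocks, adjust 1 of the 4 arrays above depending on relation of 2 stocks
--     for n in range(1, len(x)):
--         # if both stocks >= 0 on that day, update dbl_up array (instances+1, total_x+x[n], total_y+y[n])
--         if x[n] >= 0 and y[n] >= 0: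
--             dbl_up[0] += 1
--             dbl_up[1] += x[n]
--             dbl_up[2] += y[n]
--         elif y[n] >= 0:  # x guaranteed < 0, therefore update dwn_up
--             dwn_up[0] += 1
--             dwn_up[1] += x[n]
--             dwn_up[2] += y[n]
--         elif x[n] >= 0:  # y guaranteed < 0, therefore update up_dwn
--             up_dwn[0] += 1
--             up_dwn[1] += x[n]
--             up_dwn[2] += y[n]
--         else:  # x and y guaranteed < 0, therefore update dbl_dwn
--             dbl_dwn[0] += 1
--             dbl_dwn[1] += x[n]
--             dbl_dwn[2] += y[n]
--
--     # return array w all 4 of the 3 item arrays from loop above within (shows relation between 2 stocks)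
--     return [dbl_up, dwn_up, up_dwn, dbl_dwn]
-- ===== SOURCE B (Python) =====
-- def gen_diversification(x, y):
--     # Each bucket is computed independently: collect the matching indices
--     # (1..len(x)-1, in order), then report [count, sum of x, sum of y].
--     def bucket(p):
--         ns = [n for n in range(1, len(x)) if p(x[n], y[n])]
--         return [len(ns), sum(x[n] for n in ns), sum(y[n] for n in ns)]
--     return [bucket(lambda a, b: a >= 0 and b >= 0),
--             bucket(lambda a, b: a < 0 and b >= 0),
--             bucket(lambda a, b: a >= 0 and b < 0),
--             bucket(lambda a, b: a < 0 and b < 0)]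
-- ===== Notes on version B (the rewrite author's own statement) =====
-- stated objective: alternative
-- what changed: Replaces the single stateful loop with an if/elif chain mutating four accumulator arrays by four independent per-bucket aggregations: each bucket is a sign-predicate filter over the index range followed by count/sum-of-x/sum-of-y.
import Mathlib
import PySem

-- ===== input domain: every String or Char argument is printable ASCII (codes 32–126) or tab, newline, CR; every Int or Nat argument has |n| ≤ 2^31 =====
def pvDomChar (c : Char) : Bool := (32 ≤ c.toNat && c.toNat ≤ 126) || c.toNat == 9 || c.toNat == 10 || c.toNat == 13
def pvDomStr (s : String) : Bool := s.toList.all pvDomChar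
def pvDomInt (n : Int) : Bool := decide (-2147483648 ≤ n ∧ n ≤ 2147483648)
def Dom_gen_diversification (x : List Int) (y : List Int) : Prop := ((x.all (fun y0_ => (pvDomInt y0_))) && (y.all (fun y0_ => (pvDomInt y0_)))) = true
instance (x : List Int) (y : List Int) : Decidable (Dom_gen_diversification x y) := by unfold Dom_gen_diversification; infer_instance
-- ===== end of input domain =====

-- B computes the four buckets independently (filter by sign predicate, then count/sum/sum)
-- instead of A's single loop mutating four accumulators through an if/elif chain; same cost.

-- ===== PORT A =====
-- state: the four accumulator triples (dbl_up, dwn_up, up_dwn, dbl_dwn)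
def pvStepA (x y : List Int) (st : (Int × Int × Int) × (Int × Int × Int) × (Int × Int × Int) × (Int × Int × Int))
    (n : Int) : (Int × Int × Int) × (Int × Int × Int) × (Int × Int × Int) × (Int × Int × Int) :=
  let xn := PySem.List.pyGetD x n 0
  let yn := PySem.List.pyGetD y n 0
  if xn ≥ 0 ∧ yn ≥ 0 then
    ((st.1.1 + 1, st.1.2.1 + xn, st.1.2.2 + yn), st.2)
  else if yn ≥ 0 then
    (st.1, (st.2.1.1 + 1, st.2.1.2.1 + xn, st.2.1.2.2 + yn), st.2.2)
  else if xn ≥ 0 then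
    (st.1, st.2.1, (st.2.2.1.1 + 1, st.2.2.1.2.1 + xn, st.2.2.1.2.2 + yn), st.2.2.2)
  else
    (st.1, st.2.1, st.2.2.1, (st.2.2.2.1 + 1, st.2.2.2.2.1 + xn, st.2.2.2.2.2 + yn))

def gen_diversification (x : List Int) (y : List Int) : List (List Int) :=
  let st := (PySem.List.pyRange 1 x.length 1).foldl (pvStepA x y)
    ((0, 0, 0), (0, 0, 0), (0, 0, 0), (0, 0, 0))
  [[st.1.1, st.1.2.1, st.1.2.2],
   [st.2.1.1, st.2.1.2.1, st.2.1.2.2],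
   [st.2.2.1.1, st.2.2.1.2.1, st.2.2.1.2.2],
   [st.2.2.2.1, st.2.2.2.2.1, st.2.2.2.2.2]]

-- ===== PORT B =====
def pvBucket (x y : List Int) (p : Int → Int → Bool) : List Int :=
  let ns := (PySem.List.pyRange 1 x.length 1).filter
    (fun n => p (PySem.List.pyGetD x n 0) (PySem.List.pyGetD y n 0))
  [(ns.length : Int),
   (ns.map (fun n => PySem.List.pyGetD x n 0)).sum,
   (ns.map (fun n => PySem.List.pyGetD y n 0)).sum]

def gen_diversification_alt (x : List Int) (y : List Int) : List (List Int) :=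
  [pvBucket x y (fun a b => decide (a ≥ 0) && decide (b ≥ 0)),
   pvBucket x y (fun a b => decide (a < 0) && decide (b ≥ 0)),
   pvBucket x y (fun a b => decide (a ≥ 0) && decide (b < 0)),
   pvBucket x y (fun a b => decide (a < 0) && decide (b < 0))]

-- ===== PRECONDITION & SPEC =====
-- Pre_ excludes exactly the inputs where Python A raises IndexError: y shorter than x (with len(x) ≥ 2).
def Pre_gen_diversification (x : List Int) (y : List Int) : Prop :=
  x.length ≤ 1 ∨ x.length ≤ y.length
instance (x : List Int) (y : List Int) : Decidable (Pre_gen_diversification x y) := by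
  unfold Pre_gen_diversification; infer_instance

def pvWitness_gen_diversification : List Int × List Int := ([1, -2, 3], [0, -1, 5])

def Spec_gen_diversification (x : List Int) (y : List Int) (out : List (List Int)) : Prop := out = gen_diversification_alt x y
instance (x : List Int) (y : List Int) (out : List (List Int)) : Decidable (Spec_gen_diversification x y out) := by unfold Spec_gen_diversification; infer_instance

-- ===== CLAIM (what is proved, stated in full; the proofs are below) =====
def Claim_equal_gen_diversification : Prop := ∀ (x : List Int) (y : List Int), Dom_gen_diversification x y → Pre_gen_diversification x y → Spec_gen_diversification x y (gen_diversification x y)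

-- ===== LEMMAS AND PROOFS =====

-- aggregate of one bucket over an arbitrary index list
def pvAgg (x y : List Int) (p : Int → Int → Bool) (l : List Int) : Int × Int × Int :=
  let ns := l.filter (fun n => p (PySem.List.pyGetD x n 0) (PySem.List.pyGetD y n 0))
  ((ns.length : Int),
   (ns.map (fun n => PySem.List.pyGetD x n 0)).sum,
   (ns.map (fun n => PySem.List.pyGetD y n 0)).sum)

def pvAddT (a b : Int × Int × Int) : Int × Int × Int := (a.1 + b.1, a.2.1 + b.2.1, a.2.2 + b.2.2)

lemma pvFold_eq (x y : List Int) : ∀ (l : List Int)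
    (st : (Int × Int × Int) × (Int × Int × Int) × (Int × Int × Int) × (Int × Int × Int)),
    l.foldl (pvStepA x y) st =
      (pvAddT st.1 (pvAgg x y (fun a b => decide (a ≥ 0) && decide (b ≥ 0)) l),
       pvAddT st.2.1 (pvAgg x y (fun a b => decide (a < 0) && decide (b ≥ 0)) l),
       pvAddT st.2.2.1 (pvAgg x y (fun a b => decide (a ≥ 0) && decide (b < 0)) l),
       pvAddT st.2.2.2 (pvAgg x y (fun a b => decide (a < 0) && decide (b < 0)) l)) := by
  intro l
  induction l with
  | nil => intro st; simp [pvAgg, pvAddT]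
  | cons a l ih =>
    intro st
    simp only [List.foldl_cons]
    rw [ih]
    by_cases hx : (0 : Int) ≤ PySem.List.pyGetD x a 0 <;>
      by_cases hy : (0 : Int) ≤ PySem.List.pyGetD y a 0
    · simp [pvStepA, pvAgg, pvAddT, hx, hy, not_lt.mpr hx, not_lt.mpr hy, Prod.ext_iff]
      omega
    · simp [pvStepA, pvAgg, pvAddT, hx, hy, not_lt.mpr hx, lt_of_not_ge hy, Prod.ext_iff]
      omega
    · simp [pvStepA, pvAgg, pvAddT, hx, hy, lt_of_not_ge hx, not_lt.mpr hy, Prod.ext_iff]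
      omega
    · simp [pvStepA, pvAgg, pvAddT, hx, hy, lt_of_not_ge hx, lt_of_not_ge hy, Prod.ext_iff]
      omega

-- ===== VERDICT (by name: the statement is the Claim_ definition above) =====
theorem gen_diversification_spec : Claim_equal_gen_diversification := by
  intro x y _ _
  unfold Spec_gen_diversification gen_diversification gen_diversification_alt pvBucket
  rw [pvFold_eq]
  simp [pvAddT, pvAgg]
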